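-- pv_equiv track=rewrite | github.com/SkylerWhiteYoYo/myGitHub | 백준/구슬탈출3.py | slide_ball
-- ===== SOURCE A (Python) =====
-- def slide_ball(line,direction):
--     if direction == 'd' or direction == 'r':
--         line = line[::-1]
--
--     for k in range(len(line)-3):
--         for i in range(2,len(line)-1):
--             if line[i] == '#' or line[i] == '.' or line[i] == 'O':
--                 continue
--             elif line[i] =='B' or line[i] == 'R':
--                 if line[i-1] == '#':
--                     continue
--                 elif line[i-1] == 'O' :
--                     line = line[:i] + '.' + line[i+1:]
--                 elif line[i-1] == '.':
--                     line = line[:i-1] + line[i] + line[i:]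
--                     line = line[:i] + '.' + line[i+1:]
--                 elif line[i-1] == 'B' or line[i-1] == 'R':
--                     continue
--     if direction == 'd' or direction == 'r':
--         line = line[::-1]
--
--     return line
-- ===== SOURCE B (Python) =====
-- def _settle_segment(seg):
--     # seg contains only '.', 'O', 'B', 'R'
--     if 'O' in seg:
--         h = seg.index('O')
--         balls = [c for c in seg[:h] if c == 'B' or c == 'R']
--         return (''.join(balls) + '.' * (h - len(balls))
--                 + ''.join('O' if c == 'O' else '.' for c in seg[h:]))
--     balls = [c for c in seg if c == 'B' or c == 'R']
--     return ''.join(balls) + '.' * (len(seg) - len(balls))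
--
--
-- def slide_ball(line, direction):
--     if direction == 'd' or direction == 'r':
--         line = line[::-1]
--     n = len(line)
--     if n <= 1:
--         res = line
--     else:
--         core = line[1:n - 1]
--         parts = []
--         seg = []
--         for c in core:
--             if c == '.' or c == 'O' or c == 'B' or c == 'R':
--                 seg.append(c)
--             else:
--                 parts.append(_settle_segment(seg))
--                 parts.append(c)
--                 seg = []
--         parts.append(_settle_segment(seg))
--         res = line[0] + ''.join(parts) + line[n - 1]
--     if direction == 'd' or direction == 'r':
--         res = res[::-1]
--     return res
-- ===== Notes on version B (the rewrite author's own statement) =====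
-- stated objective: faster
-- what changed: A repeatedly sweeps the line len-3 times swapping each ball one cell at a time (with string re-slicing per move); B computes the settled line in one pass, splitting the interior into blocker-separated segments and packing each segment's balls against the wall, dropping balls that lie beyond the first hole.
import Mathlib
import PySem

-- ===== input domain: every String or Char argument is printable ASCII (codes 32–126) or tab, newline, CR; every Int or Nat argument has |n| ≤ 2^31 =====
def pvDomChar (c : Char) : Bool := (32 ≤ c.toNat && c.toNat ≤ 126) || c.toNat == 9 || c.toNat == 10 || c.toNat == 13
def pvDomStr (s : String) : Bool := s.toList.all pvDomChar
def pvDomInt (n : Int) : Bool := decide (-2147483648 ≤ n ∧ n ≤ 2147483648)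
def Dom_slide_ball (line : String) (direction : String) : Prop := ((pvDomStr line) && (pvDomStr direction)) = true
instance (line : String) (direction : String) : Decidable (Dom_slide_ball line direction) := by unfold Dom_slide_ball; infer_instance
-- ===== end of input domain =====

-- B replaces A's O(n^2) repeated neighbour-swap sweeps by a single left-to-right
-- segment-packing pass (balls pack against the wall, balls past a hole vanish); objective: faster.

-- ===== PORT A =====
-- inner-loop body of A for one index i (the two slicing assignments are ported with PySem.List.slice)
def innerStepA (l : List Char) (i : Int) : List Char :=
  let ci := PySem.List.pyGetD l i ' '
  if ci == '#' || ci == '.' || ci == 'O' then l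
  else if ci == 'B' || ci == 'R' then
    let cm := PySem.List.pyGetD l (i - 1) ' '
    if cm == '#' then l
    else if cm == 'O' then
      PySem.List.slice l none (some i) ++ '.' :: PySem.List.slice l (some (i + 1)) none
    else if cm == '.' then
      let l2 := PySem.List.slice l none (some (i - 1)) ++ ci :: PySem.List.slice l (some i) none
      PySem.List.slice l2 none (some i) ++ '.' :: PySem.List.slice l2 (some (i + 1)) none
    else l
  else l

-- one execution of A's inner 'for i in range(2, len(line)-1)' loop
def innerFoldA (l : List Char) : List Char :=
  (PySem.List.pyRange 2 ((l.length : Int) - 1) 1).foldl innerStepA l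

-- port of A; line[::-1] is List.reverse (PySem.List.slice?_none_none_neg_one)
def slide_ball (line : String) (direction : String) : String :=
  let l0 := line.toList
  let l1 := if direction == "d" || direction == "r" then l0.reverse else l0
  let l2 := (PySem.List.pyRange 0 ((l1.length : Int) - 3) 1).foldl (fun l _k => innerFoldA l) l1
  let l3 := if direction == "d" || direction == "r" then l2.reverse else l2
  String.ofList l3

-- ===== PORT B =====
-- port of Source B's _settle_segment
def settleSegB (seg : List Char) : List Char :=
  if seg.contains 'O' then
    let h := (PySem.List.index? seg 'O').getD 0
    let balls := (PySem.List.slice seg none (some (h : Int))).filter (fun c => c == 'B' || c == 'R')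
    balls ++ List.replicate (h - balls.length) '.' ++
      (PySem.List.slice seg (some (h : Int)) none).map (fun c => if c == 'O' then 'O' else '.')
  else
    let balls := seg.filter (fun c => c == 'B' || c == 'R')
    balls ++ List.replicate (seg.length - balls.length) '.'

-- port of B; the loop over core carries the pair (parts joined so far, current seg)
def slide_ball_alt (line : String) (direction : String) : String :=
  let l0 := line.toList
  let l := if direction == "d" || direction == "r" then l0.reverse else l0
  let n := l.length
  let res :=
    if n ≤ 1 then l
    else
      let core := PySem.List.slice l (some 1) (some ((n : Int) - 1))
      let ps := core.foldl (fun (ps : List Char × List Char) c =>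
          if c == '.' || c == 'O' || c == 'B' || c == 'R' then (ps.1, ps.2 ++ [c])
          else (ps.1 ++ settleSegB ps.2 ++ [c], [])) ([], [])
      PySem.List.pyGetD l 0 ' ' :: (ps.1 ++ settleSegB ps.2) ++ [PySem.List.pyGetD l ((n : Int) - 1) ' ']
  let res2 := if direction == "d" || direction == "r" then res.reverse else res
  String.ofList res2

-- ===== PRECONDITION & SPEC =====
def Spec_slide_ball (line : String) (direction : String) (out : String) : Prop := out = slide_ball_alt line direction
instance (line : String) (direction : String) (out : String) : Decidable (Spec_slide_ball line direction out) := by unfold Spec_slide_ball; infer_instance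

-- ===== CLAIM (what is proved, stated in full; the proofs are below) =====
def Claim_equal_slide_ball : Prop := ∀ (line : String) (direction : String), Dom_slide_ball line direction → Spec_slide_ball line direction (slide_ball line direction)

-- ===== LEMMAS AND PROOFS =====

def ballp (c : Char) : Bool := c == 'B' || c == 'R'
def cellp (c : Char) : Bool := c == '.' || c == 'O' || c == 'B' || c == 'R'
def sw : List Char → List Char
  | [] => []
  | [a] => [a]
  | a :: b :: t =>
    if ballp b then
      if a == 'O' then a :: sw ('.' :: t)
      else if a == '.' then b :: sw ('.' :: t)
      else a :: sw (b :: t)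
    else a :: sw (b :: t)
termination_by l => l.length

lemma sw_nil : sw [] = [] := by simp [sw]
lemma sw_single (a : Char) : sw [a] = [a] := by simp [sw]
lemma sw_cons2 (a b : Char) (t : List Char) :
    sw (a :: b :: t) =
      if ballp b then
        if a == 'O' then a :: sw ('.' :: t)
        else if a == '.' then b :: sw ('.' :: t)
        else a :: sw (b :: t)
      else a :: sw (b :: t) := by
  rw [sw]

lemma sw_peel (x : Char) (t : List Char) (hx : ballp x = true ∨ cellp x = false) :
    sw (x :: t) = x :: sw t := by
  cases t with
  | nil => simp [sw]
  | cons b t =>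
    have h1 : (x == 'O') = false := by
      rcases hx with hx | hx
      · simp only [ballp] at hx; rcases (by simpa using hx : x = 'B' ∨ x = 'R') with rfl | rfl <;> decide
      · simp only [cellp] at hx; simp at hx; simp; tauto
    have h2 : (x == '.') = false := by
      rcases hx with hx | hx
      · simp only [ballp] at hx; rcases (by simpa using hx : x = 'B' ∨ x = 'R') with rfl | rfl <;> decide
      · simp only [cellp] at hx; simp at hx; simp; tauto
    rw [sw_cons2]
    simp [h1, h2]

lemma sw_length (l : List Char) : (sw l).length = l.length := by
  fun_induction sw l <;> simp_all

def eatF : List Char → List Char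
  | [] => []
  | c :: t => if ballp c then '.' :: t else c :: t
def hstep (y : List Char) : List Char := sw (eatF y)
def wipeF : List Char → List Char := List.map (fun c => if c == 'O' then 'O' else '.')

lemma eatF_length (l : List Char) : (eatF l).length = l.length := by
  cases l with
  | nil => rfl
  | cons c t => simp only [eatF]; split <;> simp

lemma hstep_length (l : List Char) : (hstep l).length = l.length := by
  simp [hstep, sw_length, eatF_length]

lemma sw_dots (e : Nat) : sw (List.replicate e '.') = List.replicate e '.' := by
  induction e with
  | zero => simp [sw]
  | succ n ih =>
    cases n with
    | zero => simp [sw]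
    | succ m =>
      rw [List.replicate_succ, List.replicate_succ, sw_cons2]
      simp only [show ballp '.' = false from rfl]
      rw [← List.replicate_succ, ih]
      simp [List.replicate_succ]

lemma sw_split (u v : List Char) (x : Char) (hx : ballp x = false) :
    sw (u ++ x :: v) = sw u ++ sw (x :: v) := by
  fun_induction sw u with
  | case1 => simp
  | case2 a =>
    rw [List.cons_append, List.nil_append, sw_cons2]
    simp [hx]
  | case3 a b t hb h1 ih =>
    rw [List.cons_append, List.cons_append, sw_cons2, if_pos hb, if_pos h1,
      ← List.cons_append, ih]
    simp
  | case4 a b t hb h1 h2 ih =>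
    rw [List.cons_append, List.cons_append, sw_cons2, if_pos hb, if_neg h1, if_pos h2,
      ← List.cons_append, ih]
    simp
  | case5 a b t hb h1 h2 ih =>
    rw [List.cons_append, List.cons_append, sw_cons2, if_pos hb, if_neg h1, if_neg h2,
      ← List.cons_append, ih]
    simp
  | case6 a b t hb ih =>
    rw [List.cons_append, List.cons_append, sw_cons2, if_neg hb,
      ← List.cons_append, ih]
    simp

lemma sw_hole_head (y : List Char) : sw ('O' :: y) = 'O' :: sw (eatF y) := by
  cases y with
  | nil => simp [sw, eatF]
  | cons b t =>
    rw [sw_cons2]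
    by_cases hb : ballp b = true
    · simp [hb, eatF]
    · simp [hb, eatF]

lemma sw_splitIter (k : Nat) (u v : List Char) (x : Char) (hx : cellp x = false) :
    sw^[k] (u ++ x :: v) = sw^[k] u ++ x :: sw^[k] v := by
  have hball : ballp x = false := by
    simp only [cellp] at hx; simp only [ballp]; simp at hx ⊢; tauto
  induction k generalizing u v with
  | zero => simp
  | succ n ih =>
    rw [Function.iterate_succ_apply, Function.iterate_succ_apply,
        Function.iterate_succ_apply (f := sw) (n := n)]
    rw [sw_split u v x hball, sw_peel x v (Or.inr hx)]
    exact ih (sw u) (sw v)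

lemma sw_holeSplitIter (k : Nat) (u v : List Char) :
    sw^[k] (u ++ 'O' :: v) = sw^[k] u ++ 'O' :: hstep^[k] v := by
  induction k generalizing u v with
  | zero => simp
  | succ n ih =>
    rw [Function.iterate_succ_apply, Function.iterate_succ_apply,
        Function.iterate_succ_apply (f := hstep)]
    rw [sw_split u v 'O' rfl, sw_hole_head]
    exact ih (sw u) (hstep v)

lemma hstep_dots (e : Nat) : hstep (List.replicate e '.') = List.replicate e '.' := by
  cases e with
  | zero => simp [hstep, eatF, sw]
  | succ n =>
    rw [List.replicate_succ]
    show sw (eatF ('.' :: List.replicate n '.')) = _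
    rw [show eatF ('.' :: List.replicate n '.') = '.' :: List.replicate n '.' from by simp [eatF, ballp]]
    rw [← List.replicate_succ, sw_dots, List.replicate_succ]

lemma exists_first_split (p : Char → Bool) (v : List Char) (h : ∃ x ∈ v, p x = true) :
    ∃ u x z, v = u ++ x :: z ∧ p x = true ∧ ∀ y ∈ u, p y = false := by
  induction v with
  | nil => simp at h
  | cons c t ih =>
    by_cases hc : p c = true
    · exact ⟨[], c, t, by simp, hc, by simp⟩
    · obtain ⟨x, hx, hpx⟩ := h
      rcases List.mem_cons.mp hx with rfl | hx
      · exact absurd hpx hc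
      · obtain ⟨u, x', z, h1, h2, h3⟩ := ih ⟨x, hx, hpx⟩
        exact ⟨c :: u, x', z, by simp [h1], h2, by
          intro y hy
          rcases List.mem_cons.mp hy with rfl | hy
          · exact eq_false_of_ne_true hc
          · exact h3 y hy⟩

lemma foldl_const_iterate {α β : Type} (L : List β) (f : α → α) (a : α) :
    L.foldl (fun x _ => f x) a = f^[L.length] a := by
  induction L generalizing a with
  | nil => rfl
  | cons b t ih => simpa [Function.iterate_succ_apply] using ih (f a)

lemma list_decomp (l : List Char) (h : 2 ≤ l.length) :
    ∃ x c z, l = x :: c ++ [z] := by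
  cases l with
  | nil => simp at h
  | cons x r =>
    rcases List.eq_nil_or_concat r with rfl | ⟨c, z, rfl⟩
    · simp at h
    · exact ⟨x, c, z, by simp⟩

def encG (G : List (Nat × Char)) (e : Nat) : List Char :=
  (G.flatMap fun p => List.replicate p.1 '.' ++ [p.2]) ++ List.replicate e '.'
def sumG (G : List (Nat × Char)) : Nat := (G.map Prod.fst).sum
def zeroG (G : List (Nat × Char)) : List (Nat × Char) := G.map (fun p => (0, p.2))
def sweepG : Bool → List (Nat × Char) → List (Nat × Char) × Bool
  | b, [] => ([], b)
  | b, (g, ch) :: r =>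
    let g' := g + (if b then 1 else 0)
    if g' = 0 then
      let p := sweepG false r; ((0, ch) :: p.1, p.2)
    else
      let p := sweepG true r; ((g' - 1, ch) :: p.1, p.2)
def toGapsF : List Char → List (Nat × Char) × Nat
  | [] => ([], 0)
  | c :: t =>
    let p := toGapsF t
    if c == '.' then
      match p.1 with
      | [] => ([], p.2 + 1)
      | (g, ch) :: r => ((g + 1, ch) :: r, p.2)
    else ((0, c) :: p.1, p.2)
def ballG (G : List (Nat × Char)) : Prop := ∀ p ∈ G, ballp p.2 = true

lemma encG_nil (e : Nat) : encG [] e = List.replicate e '.' := by simp [encG]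
lemma encG_cons (g : Nat) (ch : Char) (r : List (Nat × Char)) (e : Nat) :
    encG ((g, ch) :: r) e = List.replicate g '.' ++ ch :: encG r e := by
  simp [encG]

lemma length_encG (G : List (Nat × Char)) (e : Nat) :
    (encG G e).length = sumG G + G.length + e := by
  induction G with
  | nil => simp [encG, sumG]
  | cons p r ih =>
    obtain ⟨g, ch⟩ := p
    rw [encG_cons]
    simp [sumG] at ih ⊢
    omega

lemma encG_zero (G : List (Nat × Char)) (e : Nat) :
    encG (zeroG G) e = G.map Prod.snd ++ List.replicate e '.' := by
  induction G with
  | nil => simp [zeroG, encG]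
  | cons p r ih =>
    obtain ⟨g, ch⟩ := p
    simp only [zeroG, List.map_cons] at ih ⊢
    rw [encG_cons]
    simp [ih]

lemma sweepG_false_cons (g : Nat) (ch : Char) (r : List (Nat × Char)) :
    sweepG false ((g, ch) :: r)
      = if g = 0 then ((0, ch) :: (sweepG false r).1, (sweepG false r).2)
        else ((g - 1, ch) :: (sweepG true r).1, (sweepG true r).2) := by
  simp [sweepG]

lemma sweepG_true_cons (g : Nat) (ch : Char) (r : List (Nat × Char)) :
    sweepG true ((g, ch) :: r) = ((g, ch) :: (sweepG true r).1, (sweepG true r).2) := by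
  simp [sweepG]

lemma sweepG_snd (b : Bool) (G : List (Nat × Char)) :
    ((sweepG b G).1).map Prod.snd = G.map Prod.snd := by
  induction G generalizing b with
  | nil => simp [sweepG]
  | cons p r ih =>
    obtain ⟨g, ch⟩ := p
    cases b
    · rw [sweepG_false_cons]
      split <;> simp [ih]
    · rw [sweepG_true_cons]
      simp [ih]

lemma sweepG_len (b : Bool) (G : List (Nat × Char)) :
    (sweepG b G).1.length = G.length := by
  have := sweepG_snd b G
  simpa using congrArg List.length this

lemma sweepG_sum (b : Bool) (G : List (Nat × Char)) :
    sumG (sweepG b G).1 + (if (sweepG b G).2 then 1 else 0)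
      = sumG G + (if b then 1 else 0) := by
  induction G generalizing b with
  | nil => simp [sweepG, sumG]
  | cons p r ih =>
    obtain ⟨g, ch⟩ := p
    cases b
    · by_cases hg : g = 0
      · rw [sweepG_false_cons, if_pos hg]
        have := ih false
        simp only [sumG, List.map_cons, List.sum_cons] at this ⊢
        simp at this ⊢
        omega
      · rw [sweepG_false_cons, if_neg hg]
        have := ih true
        simp only [sumG, List.map_cons, List.sum_cons] at this ⊢
        simp at this ⊢
        omega
    · rw [sweepG_true_cons]
      have := ih true
      simp only [sumG, List.map_cons, List.sum_cons] at this ⊢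
      simp at this ⊢
      omega

lemma sweepG_emit (b : Bool) (G : List (Nat × Char)) :
    (sweepG b G).2 = (b || decide (0 < sumG G)) := by
  induction G generalizing b with
  | nil => simp [sweepG, sumG]
  | cons p r ih =>
    obtain ⟨g, ch⟩ := p
    cases b
    · by_cases hg : g = 0
      · rw [sweepG_false_cons, if_pos hg, ih false]
        subst hg
        simp [sumG]
      · rw [sweepG_false_cons, if_neg hg, ih true]
        simp only [sumG, List.map_cons, List.sum_cons]
        simp
        omega
    · rw [sweepG_true_cons, ih true]
      simp

lemma sweepG_zero (G : List (Nat × Char)) (h : sumG G = 0) :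
    sweepG false G = (G, false) := by
  induction G with
  | nil => simp [sweepG]
  | cons p r ih =>
    obtain ⟨g, ch⟩ := p
    simp only [sumG, List.map_cons, List.sum_cons] at h
    have hg : g = 0 := by omega
    have hr : sumG r = 0 := by simp [sumG]; omega
    subst hg
    rw [sweepG_false_cons]
    simp [ih hr]

lemma sw_dotsBall (g : Nat) (c : Char) (y : List Char) (hc : ballp c = true) :
    sw (List.replicate (g + 1) '.' ++ c :: y)
      = List.replicate g '.' ++ c :: sw ('.' :: y) := by
  induction g with
  | zero =>
    rw [List.replicate_succ, List.replicate_zero, List.nil_append, List.cons_append,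
      List.nil_append, sw_cons2, if_pos hc]
    simp
  | succ n ih =>
    rw [List.replicate_succ, List.cons_append, List.replicate_succ (n := n)]
    rw [show ('.' :: List.replicate n '.') ++ c :: y
        = '.' :: (List.replicate n '.' ++ c :: y) from by simp] at *
    rw [show ('.' :: ('.' :: (List.replicate n '.' ++ c :: y)))
        = '.' :: '.' :: (List.replicate n '.' ++ c :: y) from rfl, sw_cons2]
    have : ballp '.' = false := rfl
    rw [if_neg (by simp [this])]
    rw [show '.' :: (List.replicate n '.' ++ c :: y) = List.replicate (n + 1) '.' ++ c :: y
      from by simp [List.replicate_succ], ih]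
    simp [List.replicate_succ]

lemma sw_encG (G : List (Nat × Char)) (e : Nat) (hb : ballG G) :
    sw (encG G e)
      = encG (sweepG false G).1 (e + if (sweepG false G).2 then 1 else 0) := by
  induction hn : G.length using Nat.strong_induction_on generalizing G with
  | _ n ih =>
  match G with
  | [] => simp [sweepG, encG, sw_dots]
  | (g, ch) :: r =>
    have hch : ballp ch = true := hb (g, ch) (by simp)
    have hbr : ballG r := fun p hp => hb p (by simp [hp])
    by_cases hg : g = 0
    · subst hg
      rw [encG_cons, sweepG_false_cons, if_pos rfl]
      simp only [List.replicate_zero, List.nil_append]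
      rw [sw_peel ch _ (Or.inl hch)]
      rw [show (encG r e) = encG r e from rfl]
      rw [ih r.length (by subst hn; simp) r hbr rfl, encG_cons]
      simp
    · obtain ⟨g', rfl⟩ : ∃ g', g = g' + 1 := ⟨g - 1, by omega⟩
      rw [encG_cons, sweepG_false_cons, if_neg hg]
      match r with
      | [] =>
        rw [show encG [] e = List.replicate e '.' from by simp [encG]]
        rw [sw_dotsBall g' ch _ hch]
        rw [show ('.' :: List.replicate e '.') = List.replicate (e + 1) '.' from by
          simp [List.replicate_succ]]
        rw [sw_dots]
        simp [sweepG, encG]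
      | (g1, c1) :: r1 =>
        rw [sw_dotsBall g' ch _ hch]
        rw [show ('.' :: encG ((g1, c1) :: r1) e) = encG ((g1 + 1, c1) :: r1) e from by
          rw [encG_cons, encG_cons]; simp [List.replicate_succ]]
        rw [ih ((g1 + 1, c1) :: r1).length (by subst hn; simp) _
          (fun p hp => by
            rcases List.mem_cons.mp hp with rfl | hp
            · exact hb (g1, c1) (by simp)
            · exact hb p (by simp [hp])) rfl]
        rw [sweepG_false_cons]
        by_cases hg1 : g1 + 1 = 0
        · omega
        · rw [if_neg hg1, sweepG_true_cons, encG_cons]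
          simp [encG_cons]

lemma ballG_sweepG (b : Bool) (G : List (Nat × Char)) (hb : ballG G) :
    ballG (sweepG b G).1 := by
  intro p hp
  have : p.2 ∈ ((sweepG b G).1).map Prod.snd := List.mem_map_of_mem hp
  rw [sweepG_snd] at this
  obtain ⟨q, hq, hq2⟩ := List.mem_map.mp this
  rw [← hq2]
  exact hb q hq

lemma zeroG_eq_map_snd (G : List (Nat × Char)) :
    zeroG G = (G.map Prod.snd).map (fun c => ((0 : Nat), c)) := by
  unfold zeroG
  rw [List.map_map]
  rfl

lemma zeroG_sweepG (b : Bool) (G : List (Nat × Char)) :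
    zeroG (sweepG b G).1 = zeroG G := by
  rw [zeroG_eq_map_snd, zeroG_eq_map_snd, sweepG_snd]

lemma zeroG_of_sum (G : List (Nat × Char)) (h : sumG G = 0) : G = zeroG G := by
  induction G with
  | nil => rfl
  | cons p r ih =>
    obtain ⟨g, ch⟩ := p
    simp only [sumG, List.map_cons, List.sum_cons] at h
    have hg : g = 0 := by omega
    subst hg
    rw [zeroG, List.map_cons]
    have h2 : r = zeroG r := ih (by simp [sumG]; omega)
    rw [show ((0, (0, ch).2) : Nat × Char) = (0, ch) from rfl, ← zeroG, ← h2]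

lemma settleIterG (k : Nat) (G : List (Nat × Char)) (e : Nat) (hb : ballG G)
    (hk : sumG G ≤ k) :
    sw^[k] (encG G e) = encG (zeroG G) (e + sumG G) := by
  induction k generalizing G e with
  | zero =>
    have h0 : sumG G = 0 := by omega
    rw [Function.iterate_zero_apply, h0, ← zeroG_of_sum G h0, add_zero]
  | succ n ih =>
    by_cases h0 : sumG G = 0
    · rw [Function.iterate_succ_apply, sw_encG G e hb, sweepG_zero G h0,
        show ((G, false) : List (Nat × Char) × Bool).1 = G from rfl,
        show ((G, false) : List (Nat × Char) × Bool).2 = false from rfl]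
      simp only [Bool.false_eq_true, if_false, add_zero]
      exact ih G e hb (by omega)
    · rw [Function.iterate_succ_apply, sw_encG G e hb]
      have hemit : (sweepG false G).2 = true := by rw [sweepG_emit]; simp; omega
      have hsum : sumG (sweepG false G).1 + 1 = sumG G := by
        have := sweepG_sum false G
        rw [hemit] at this
        simp at this
        omega
      rw [hemit, if_pos rfl, ih (sweepG false G).1 (e + 1) (ballG_sweepG false G hb) (by omega)]
      rw [zeroG_sweepG]
      congr 1
      omega

lemma toGaps_spec (t : List Char) (h : ∀ c ∈ t, c = '.' ∨ ballp c = true) :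
    encG (toGapsF t).1 (toGapsF t).2 = t ∧ ballG (toGapsF t).1 ∧
      (toGapsF t).1.map Prod.snd = t.filter ballp := by
  induction t with
  | nil => refine ⟨rfl, by intro p hp; simp [toGapsF] at hp, rfl⟩
  | cons c t ih =>
    obtain ⟨henc, hball, hsnd⟩ := ih (fun x hx => h x (by simp [hx]))
    by_cases hc : c = '.'
    · subst hc
      rcases e : (toGapsF t).1 with _ | ⟨⟨g, ch⟩, r⟩
      · have hred : toGapsF ('.' :: t) = ([], (toGapsF t).2 + 1) := by
          simp only [toGapsF]; rw [e]; rfl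
        rw [e] at henc hball hsnd
        rw [hred]
        refine ⟨?_, by intro p hp; simp at hp, ?_⟩
        · rw [encG_nil] at henc ⊢
          rw [List.replicate_succ, henc]
        · simp only [List.map_nil] at hsnd ⊢
          rw [List.filter_cons_of_neg (by simp [ballp]), ← hsnd]
      · have hred : toGapsF ('.' :: t) = ((g + 1, ch) :: r, (toGapsF t).2) := by
          simp only [toGapsF]; rw [e]; rfl
        rw [e] at henc hball hsnd
        rw [hred]
        refine ⟨?_, ?_, ?_⟩
        · rw [encG_cons] at henc ⊢
          rw [List.replicate_succ, List.cons_append, henc]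
        · intro p hp
          rcases List.mem_cons.mp hp with rfl | hp
          · exact hball (g, ch) (by simp)
          · exact hball p (by simp [hp])
        · simp only [List.map_cons] at hsnd ⊢
          rw [List.filter_cons_of_neg (by simp [ballp]), ← hsnd]
    · have hball_c : ballp c = true := by rcases h c (by simp) with h1 | h1; exact absurd h1 hc; exact h1
      have hred : toGapsF (c :: t) = ((0, c) :: (toGapsF t).1, (toGapsF t).2) := by
        simp only [toGapsF]; rw [if_neg (by simp [hc])]
      rw [hred]
      refine ⟨?_, ?_, ?_⟩
      · rw [encG_cons, List.replicate_zero, List.nil_append, henc]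
      · intro p hp
        rcases List.mem_cons.mp hp with rfl | hp
        · exact hball_c
        · exact hball p hp
      · rw [List.map_cons, List.filter_cons_of_pos hball_c, hsnd]

lemma pack_noHole (u : List Char) (k : Nat) (h : ∀ c ∈ u, c = '.' ∨ ballp c = true)
    (hk : u.length - 1 ≤ k) :
    sw^[k] u = u.filter ballp ++ List.replicate (u.length - (u.filter ballp).length) '.' := by
  obtain ⟨henc, hball, hsnd⟩ := toGaps_spec u h
  set G := (toGapsF u).1 with hG
  set e := (toGapsF u).2 with he
  have hlen : u.length = sumG G + G.length + e := by rw [← henc, length_encG]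
  have hsum : sumG G ≤ k := by
    rcases Nat.eq_zero_or_pos (G.length + e) with h0 | h0
    · -- G = [] and e = 0, so u = [] and sumG = 0
      have : G = [] := List.length_eq_zero_iff.mp (by omega)
      rw [this]
      simp [sumG]
    · omega
  calc sw^[k] u = sw^[k] (encG G e) := by rw [henc]
    _ = encG (zeroG G) (e + sumG G) := settleIterG k G e hball hsum
    _ = G.map Prod.snd ++ List.replicate (e + sumG G) '.' := encG_zero _ _
    _ = _ := by
        rw [hsnd]
        congr 2
        have : (u.filter ballp).length = G.length := by rw [← hsnd]; simp
        omega

def nuG (G : List (Nat × Char)) : Nat := sumG G + G.length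

lemma hstep_apply (y : List Char) : hstep y = sw (eatF y) := rfl

lemma eat_encG_zero_nil (ch : Char) (e : Nat) (hch : ballp ch = true) :
    eatF (encG [(0, ch)] e) = encG [] (e + 1) := by
  rw [encG_cons]
  simp [eatF, hch, encG, List.replicate_succ]

lemma eat_encG_zero_cons (ch : Char) (g1 : Nat) (c1 : Char) (r1 : List (Nat × Char)) (e : Nat)
    (hch : ballp ch = true) :
    eatF (encG ((0, ch) :: (g1, c1) :: r1) e) = encG ((g1 + 1, c1) :: r1) e := by
  rw [encG_cons, encG_cons, encG_cons]
  simp [eatF, hch, List.replicate_succ]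

lemma eat_encG_pos (g : Nat) (ch : Char) (r : List (Nat × Char)) (e : Nat) :
    eatF (encG ((g + 1, ch) :: r) e) = encG ((g + 1, ch) :: r) e := by
  rw [encG_cons]
  simp [List.replicate_succ, eatF, ballp]

lemma absorb_gap (k : Nat) (G : List (Nat × Char)) (e : Nat) (hb : ballG G)
    (hk : nuG G ≤ k) :
    hstep^[k] (encG G e) = List.replicate (nuG G + e) '.' := by
  induction k generalizing G e with
  | zero =>
    have h0 : nuG G = 0 := by omega
    have hG : G = [] := List.length_eq_zero_iff.mp (by unfold nuG at h0; omega)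
    subst hG
    simp [encG, h0]
  | succ n ih =>
    match G with
    | [] =>
      rw [encG_nil, Function.iterate_succ_apply, hstep_dots, ← encG_nil (e := e),
        ih [] e hb (by unfold nuG sumG; simp)]
    | (g, ch) :: r =>
      have hch : ballp ch = true := hb (g, ch) (by simp)
      have hbr : ballG r := fun p hp => hb p (by simp [hp])
      rw [Function.iterate_succ_apply, hstep_apply]
      match g, r with
      | 0, [] =>
        rw [eat_encG_zero_nil ch e hch, encG_nil, sw_dots, ← encG_nil (e := e + 1),
          ih [] (e + 1) (by intro p hp; simp at hp) (by unfold nuG sumG at *; simp_all)]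
        simp only [nuG, sumG, List.map_cons, List.map_nil, List.sum_cons, List.sum_nil,
          List.length_cons, List.length_nil]
        congr 1
        omega
      | 0, (g1, c1) :: r1 =>
        rw [eat_encG_zero_cons ch g1 c1 r1 e hch]
        have hb2 : ballG ((g1 + 1, c1) :: r1) := by
          intro p hp
          rcases List.mem_cons.mp hp with rfl | hp
          · exact hbr (g1, c1) (by simp)
          · exact hbr p (by simp [hp])
        rw [sw_encG _ e hb2]
        have hemit : (sweepG false ((g1 + 1, c1) :: r1)).2 = true := by
          rw [sweepG_emit]
          simp [sumG]
        have hsum : sumG (sweepG false ((g1 + 1, c1) :: r1)).1 + 1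
            = sumG ((g1 + 1, c1) :: r1) := by
          have := sweepG_sum false ((g1 + 1, c1) :: r1)
          rw [hemit] at this; simp at this; omega
        rw [hemit, if_pos rfl]
        rw [ih _ (e + 1) (ballG_sweepG _ _ hb2) (by
          unfold nuG at *
          have hl := sweepG_len false ((g1 + 1, c1) :: r1)
          simp only [sumG, List.map_cons, List.sum_cons] at hsum hk ⊢
          simp at hl hk ⊢
          omega)]
        unfold nuG
        have hl := sweepG_len false ((g1 + 1, c1) :: r1)
        congr 1
        simp only [sumG, List.map_cons, List.sum_cons] at hsum ⊢
        simp at hl ⊢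
        omega
      | g' + 1, r =>
        rw [eat_encG_pos g' ch r e]
        have hb2 : ballG ((g' + 1, ch) :: r) := hb
        rw [sw_encG _ e hb2]
        have hemit : (sweepG false ((g' + 1, ch) :: r)).2 = true := by
          rw [sweepG_emit]
          simp [sumG]
        have hsum : sumG (sweepG false ((g' + 1, ch) :: r)).1 + 1
            = sumG ((g' + 1, ch) :: r) := by
          have := sweepG_sum false ((g' + 1, ch) :: r)
          rw [hemit] at this; simp at this; omega
        rw [hemit, if_pos rfl]
        rw [ih _ (e + 1) (ballG_sweepG _ _ hb2) (by
          unfold nuG at *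
          have hl := sweepG_len false ((g' + 1, ch) :: r)
          omega)]
        unfold nuG
        have hl := sweepG_len false ((g' + 1, ch) :: r)
        congr 1
        omega

lemma absorb_noHole (w : List Char) (k : Nat) (h : ∀ c ∈ w, c = '.' ∨ ballp c = true)
    (hk : w.length ≤ k) :
    hstep^[k] w = List.replicate w.length '.' := by
  obtain ⟨henc, hball, hsnd⟩ := toGaps_spec w h
  set G := (toGapsF w).1
  set e := (toGapsF w).2
  have hlen : w.length = sumG G + G.length + e := by rw [← henc, length_encG]
  have hnu : nuG G ≤ k := by unfold nuG; omega
  rw [← henc, absorb_gap k G e hball hnu, length_encG]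
  unfold nuG
  rfl

lemma hstep_holeHead (k : Nat) (z : List Char) :
    hstep^[k] ('O' :: z) = 'O' :: hstep^[k] z := by
  induction k generalizing z with
  | zero => simp
  | succ n ih =>
    rw [Function.iterate_succ_apply, Function.iterate_succ_apply (f := hstep), hstep_apply]
    rw [show eatF ('O' :: z) = 'O' :: z from by simp [eatF, ballp], sw_hole_head, ← hstep_apply]
    exact ih (hstep z)

lemma eatF_append (w v : List Char) (hw : w ≠ []) :
    eatF (w ++ v) = eatF w ++ v := by
  cases w with
  | nil => simp at hw
  | cons c t =>
    simp only [List.cons_append, eatF]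
    split <;> simp

lemma hstep_holeSplit (k : Nat) (w z : List Char) (hw : w ≠ []) :
    hstep^[k] (w ++ 'O' :: z) = hstep^[k] w ++ 'O' :: hstep^[k] z := by
  induction k generalizing w z with
  | zero => simp
  | succ n ih =>
    rw [Function.iterate_succ_apply, Function.iterate_succ_apply (f := hstep) (x := w),
      Function.iterate_succ_apply (f := hstep) (x := z), hstep_apply, hstep_apply,
      eatF_append w _ hw, sw_split (eatF w) z 'O' rfl, sw_hole_head, ← hstep_apply]
    have hne : hstep w ≠ [] := by
      intro hcontra
      have := hstep_length w
      rw [hcontra] at this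
      simp at this
      exact hw (List.length_eq_zero_iff.mp this.symm)
    exact ih (hstep w) (hstep z) hne

lemma wipe_noHole (w : List Char) (h : ∀ c ∈ w, c = '.' ∨ ballp c = true) :
    wipeF w = List.replicate w.length '.' := by
  induction w with
  | nil => rfl
  | cons c t ih =>
    have hc : (c == 'O') = false := by
      rcases h c (by simp) with rfl | hc
      · rfl
      · revert hc
        unfold ballp
        simp
        rintro (rfl | rfl) <;> simp
    simp only [wipeF, List.map_cons, hc, Bool.false_eq_true, if_false]
    rw [← wipeF, ih (fun x hx => h x (by simp [hx]))]
    simp [List.replicate_succ]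

lemma cellp_cases (c : Char) (h : cellp c = true) :
    c = '.' ∨ c = 'O' ∨ ballp c = true := by
  unfold cellp at h
  unfold ballp
  simp at h ⊢
  tauto

lemma wipe_theorem (v : List Char) (k : Nat) (h : ∀ c ∈ v, cellp c = true)
    (hk : v.length ≤ k) :
    hstep^[k] v = wipeF v := by
  induction hn : v.length using Nat.strong_induction_on generalizing v k with
  | _ n ih =>
  by_cases hO : 'O' ∈ v
  · obtain ⟨w, x, z, rfl, hx, hwfree⟩ :=
      exists_first_split (fun c => c == 'O') v ⟨'O', hO, by simp⟩
    have hxO : x = 'O' := by simpa using hx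
    subst hxO
    have hwnoO : ∀ c ∈ w, c = '.' ∨ ballp c = true := by
      intro c hc
      rcases cellp_cases c (h c (by simp [hc])) with h1 | h1 | h1
      · exact Or.inl h1
      · exact absurd (by simp [h1] : (c == 'O') = true) (by simp [hwfree c hc])
      · exact Or.inr h1
    have hlen : w.length + (z.length + 1) = n := by simpa using hn
    have hk' : w.length + (z.length + 1) ≤ k := by simpa using hk
    cases w with
    | nil =>
      rw [List.nil_append, hstep_holeHead]
      rw [ih z.length (by simp at hlen; omega) z k (fun c hc => h c (by simp [hc]))
        (by simp at hk'; omega) rfl]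
      simp [wipeF]
    | cons c t =>
      have hwlen : (c :: t).length = t.length + 1 := by simp
      rw [hstep_holeSplit k (c :: t) z (by simp)]
      rw [absorb_noHole (c :: t) k hwnoO (by omega)]
      rw [ih z.length (by omega) z k (fun c hc => h c (by simp [hc])) (by omega) rfl]
      rw [show wipeF ((c :: t) ++ 'O' :: z) = wipeF (c :: t) ++ 'O' :: wipeF z from by
        simp [wipeF]]
      rw [wipe_noHole (c :: t) hwnoO]
  · have hv : ∀ c ∈ v, c = '.' ∨ ballp c = true := by
      intro c hc
      rcases cellp_cases c (h c hc) with h1 | h1 | h1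
      · exact Or.inl h1
      · exact absurd (h1 ▸ hc) hO
      · exact Or.inr h1
    rw [absorb_noHole v k hv hk, wipe_noHole v hv]


lemma ballp_eq_lambda : ballp = (fun c => c == 'B' || c == 'R') := rfl

lemma settleSegB_noHole (u : List Char) (h : 'O' ∉ u) :
    settleSegB u = u.filter ballp ++ List.replicate (u.length - (u.filter ballp).length) '.' := by
  unfold settleSegB
  rw [if_neg (by simpa using h), ballp_eq_lambda]

lemma settleSegB_hole (w z : List Char) (hw : 'O' ∉ w) :
    settleSegB (w ++ 'O' :: z)
      = w.filter ballp ++ List.replicate (w.length - (w.filter ballp).length) '.'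
        ++ 'O' :: wipeF z := by
  unfold settleSegB
  rw [if_pos (by simp)]
  have hidx : PySem.List.index? (w ++ 'O' :: z) 'O' = some w.length := by
    rw [PySem.List.index?_eq_some_iff]
    exact ⟨w, z, rfl, rfl, hw⟩
  rw [hidx]
  simp only [Option.getD_some]
  rw [PySem.List.slice_to_natCast, PySem.List.slice_from_natCast,
    List.take_left, List.drop_left]
  rw [ballp_eq_lambda]
  simp [wipeF]

lemma pure_settles (u : List Char) (k : Nat) (h : ∀ c ∈ u, cellp c = true)
    (hk : u.length - 1 ≤ k) :
    sw^[k] u = settleSegB u := by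
  by_cases hO : 'O' ∈ u
  · obtain ⟨w, x, z, rfl, hx, hwfree⟩ :=
      exists_first_split (fun c => c == 'O') u ⟨'O', hO, by simp⟩
    have hxO : x = 'O' := by simpa using hx
    subst hxO
    have hwO : 'O' ∉ w := fun hc => by simpa using hwfree 'O' hc
    have hwnoO : ∀ c ∈ w, c = '.' ∨ ballp c = true := by
      intro c hc
      rcases cellp_cases c (h c (by simp [hc])) with h1 | h1 | h1
      · exact Or.inl h1
      · exact absurd (h1 ▸ hc) hwO
      · exact Or.inr h1
    rw [sw_holeSplitIter k w z]
    rw [pack_noHole w k hwnoO (by simp at hk; omega)]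
    rw [wipe_theorem z k (fun c hc => h c (by simp [hc])) (by simp at hk; omega)]
    rw [settleSegB_hole w z hwO]
  · have hu : ∀ c ∈ u, c = '.' ∨ ballp c = true := by
      intro c hc
      rcases cellp_cases c (h c hc) with h1 | h1 | h1
      · exact Or.inl h1
      · exact absurd (h1 ▸ hc) hO
      · exact Or.inr h1
    rw [pack_noHole u k hu hk, settleSegB_noHole u hO]

def settleRun : List Char → List Char → List Char
  | seg, [] => settleSegB seg
  | seg, c :: r =>
    if cellp c then settleRun (seg ++ [c]) r
    else settleSegB seg ++ c :: settleRun [] r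

lemma settleRun_pure (seg c : List Char) (h : ∀ x ∈ c, cellp x = true) :
    settleRun seg c = settleSegB (seg ++ c) := by
  induction c generalizing seg with
  | nil => simp [settleRun]
  | cons x r ih =>
    rw [settleRun, if_pos (h x (by simp))]
    rw [ih (seg ++ [x]) (fun y hy => h y (by simp [hy]))]
    simp

lemma settleRun_split (seg u v : List Char) (x : Char) (hu : ∀ y ∈ u, cellp y = true)
    (hx : cellp x = false) :
    settleRun seg (u ++ x :: v) = settleSegB (seg ++ u) ++ x :: settleRun [] v := by
  induction u generalizing seg with
  | nil =>
    rw [List.nil_append, settleRun, if_neg (by simp [hx])]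
    simp
  | cons y r ih =>
    rw [List.cons_append, settleRun, if_pos (hu y (by simp))]
    rw [ih (seg ++ [y]) (fun c hc => hu c (by simp [hc]))]
    simp

lemma sw_main (c : List Char) (k : Nat) (hk : c.length - 1 ≤ k) :
    sw^[k] c = settleRun [] c := by
  induction hn : c.length using Nat.strong_induction_on generalizing c k with
  | _ n ih =>
  by_cases hall : ∀ x ∈ c, cellp x = true
  · rw [pure_settles c k hall hk, settleRun_pure [] c hall]
    simp
  · push_neg at hall
    obtain ⟨x0, hx0mem, hx0⟩ := hall
    obtain ⟨u, x, v, rfl, hx, hufree⟩ :=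
      exists_first_split (fun ch => !cellp ch) c
        ⟨x0, hx0mem, by simp [hx0]⟩
    have hxc : cellp x = false := by simpa using hx
    have hu : ∀ y ∈ u, cellp y = true := by
      intro y hy
      have := hufree y hy
      simpa using this
    have hlen : u.length + (v.length + 1) = n := by simpa using hn
    rw [sw_splitIter k u v x hxc]
    rw [pure_settles u k hu (by omega)]
    rw [ih v.length (by omega) v k (by omega) rfl]
    rw [settleRun_split [] u v x hu hxc]
    simp

lemma cellp_eq_lambda (ch : Char) :
    (ch == '.' || ch == 'O' || ch == 'B' || ch == 'R') = cellp ch := rfl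

lemma b_fold (c : List Char) (parts seg : List Char) :
    (c.foldl (fun (ps : List Char × List Char) ch =>
        if ch == '.' || ch == 'O' || ch == 'B' || ch == 'R' then (ps.1, ps.2 ++ [ch])
        else (ps.1 ++ settleSegB ps.2 ++ [ch], [])) (parts, seg)).1
      ++ settleSegB (c.foldl (fun (ps : List Char × List Char) ch =>
        if ch == '.' || ch == 'O' || ch == 'B' || ch == 'R' then (ps.1, ps.2 ++ [ch])
        else (ps.1 ++ settleSegB ps.2 ++ [ch], [])) (parts, seg)).2
      = parts ++ settleRun seg c := by
  induction c generalizing parts seg with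
  | nil => simp [settleRun]
  | cons ch r ih =>
    rw [List.foldl_cons]
    by_cases hc : cellp ch = true
    · rw [show (if ch == '.' || ch == 'O' || ch == 'B' || ch == 'R' then (parts, seg ++ [ch])
          else (parts ++ settleSegB seg ++ [ch], [])) = (parts, seg ++ [ch]) from by
            rw [cellp_eq_lambda, if_pos hc]]
      rw [ih parts (seg ++ [ch]), settleRun, if_pos hc]
    · rw [show (if ch == '.' || ch == 'O' || ch == 'B' || ch == 'R' then (parts, seg ++ [ch])
          else (parts ++ settleSegB seg ++ [ch], [])) = (parts ++ settleSegB seg ++ [ch], []) from by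
            rw [cellp_eq_lambda, if_neg (by simp [hc])]]
      rw [ih _ [], settleRun, if_neg (by simp [hc])]
      simp

lemma getD_mid (pre : List Char) (a : Char) (rest : List Char) :
    (pre ++ a :: rest).getD pre.length ' ' = a := by
  rw [List.getD_eq_getElem?_getD, List.getElem?_append_right (by omega)]
  simp

lemma getD_mid1 (pre : List Char) (a b : Char) (rest : List Char) :
    (pre ++ a :: b :: rest).getD (pre.length + 1) ' ' = b := by
  rw [List.getD_eq_getElem?_getD, List.getElem?_append_right (by omega)]
  simp

lemma take_mid (pre : List Char) (a : Char) (rest : List Char) :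
    (pre ++ a :: rest).take (pre.length + 1) = pre ++ [a] := by
  rw [List.take_append]
  simp

lemma take_pre (pre : List Char) (rest : List Char) :
    (pre ++ rest).take pre.length = pre := by
  simp

lemma drop_mid (pre : List Char) (a : Char) (rest : List Char) :
    (pre ++ a :: rest).drop (pre.length + 1) = rest := by
  rw [List.drop_append]
  simp

lemma drop_mid2 (pre : List Char) (a b : Char) (rest : List Char) :
    (pre ++ a :: b :: rest).drop (pre.length + 2) = rest := by
  rw [List.drop_append]
  simp

lemma innerStepA_at (pre : List Char) (a b : Char) (t : List Char) (z : Char) :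
    innerStepA (pre ++ a :: b :: (t ++ [z])) ((pre.length : Int) + 1)
      = pre ++ (if ballp b then
          if a == 'O' then a :: '.' :: t
          else if a == '.' then b :: '.' :: t
          else a :: b :: t
        else a :: b :: t) ++ [z] := by
  unfold innerStepA
  have hci : PySem.List.pyGetD (pre ++ a :: b :: (t ++ [z])) ((pre.length : Int) + 1) ' ' = b := by
    rw [show ((pre.length : Int) + 1) = ((pre.length + 1 : Nat) : Int) from by push_cast; ring,
      PySem.List.pyGetD_natCast, getD_mid1]
  have hcm : PySem.List.pyGetD (pre ++ a :: b :: (t ++ [z])) ((pre.length : Int) + 1 - 1) ' ' = a := by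
    rw [show ((pre.length : Int) + 1 - 1) = ((pre.length : Nat) : Int) from by ring,
      PySem.List.pyGetD_natCast, getD_mid]
  rw [hci, hcm]
  by_cases hb : ballp b = true
  · have hb3 : (b == '#' || b == '.' || b == 'O') = false := by
      unfold ballp at hb
      simp at hb ⊢
      rcases hb with rfl | rfl <;> simp
    have hb2 : (b == 'B' || b == 'R') = true := hb
    rw [if_neg (by simp [hb3]), if_pos hb2, if_pos hb]
    by_cases ha1 : (a == '#') = true
    · have : (a == 'O') = false := by simp at ha1 ⊢; simp [ha1]
      have h2 : (a == '.') = false := by simp at ha1 ⊢; simp [ha1]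
      rw [if_pos ha1, this, h2]
      simp
    · rw [if_neg ha1]
      by_cases ha2 : (a == 'O') = true
      · rw [if_pos ha2, ha2, if_pos rfl]
        rw [show ((pre.length : Int) + 1) = ((pre.length + 1 : Nat) : Int) from by push_cast; ring]
        rw [show ((pre.length + 1 : Nat) : Int) + 1 = ((pre.length + 2 : Nat) : Int) from by
          push_cast; ring]
        rw [PySem.List.slice_to_natCast, PySem.List.slice_from_natCast]
        rw [take_mid, drop_mid2]
        have : a = 'O' := by simpa using ha2
        simp [this]
      · rw [if_neg ha2]
        by_cases ha3 : (a == '.') = true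
        · rw [if_pos ha3, if_neg (by simp at ha2 ⊢; simp [ha2]), if_pos ha3]
          have haa : a = '.' := by simpa using ha3
          subst haa
          rw [show ((pre.length : Int) + 1 - 1) = ((pre.length : Nat) : Int) from by ring]
          rw [show ((pre.length : Int) + 1) = ((pre.length + 1 : Nat) : Int) from by push_cast; ring]
          rw [show ((pre.length + 1 : Nat) : Int) + 1 = ((pre.length + 2 : Nat) : Int) from by
            push_cast; ring]
          simp only [PySem.List.slice_to_natCast, PySem.List.slice_from_natCast,
            take_pre, drop_mid, take_mid, drop_mid2]
          simp
        · rw [if_neg ha3, if_neg ha2, if_neg ha3]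
          simp
  · have hb2 : (b == 'B' || b == 'R') = false := by unfold ballp at hb; simp at hb ⊢; simp [hb]
    rw [if_neg hb]
    by_cases hb3 : (b == '#' || b == '.' || b == 'O') = true
    · rw [if_pos hb3]
      simp
    · rw [if_neg hb3, if_neg (by simp [hb2])]
      simp

lemma stepFold (rest pre : List Char) (a z : Char) :
    (PySem.List.pyRange ((pre.length : Int) + 1) ((pre.length : Int) + 1 + rest.length) 1).foldl
        innerStepA (pre ++ a :: rest ++ [z])
      = pre ++ sw (a :: rest) ++ [z] := by
  induction rest generalizing pre a with
  | nil =>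
    rw [PySem.List.pyRange_one_eq_nil (by simp)]
    simp [sw_single]
  | cons b t ih =>
    rw [PySem.List.pyRange_one_cons (by simp)]
    rw [List.foldl_cons]
    rw [show pre ++ a :: (b :: t) ++ [z] = pre ++ a :: b :: (t ++ [z]) from by simp]
    rw [innerStepA_at pre a b t z]
    have e1 : (pre.length : Int) + 1 + 1 = ((pre ++ [a]).length : Int) + 1 := by
      simp
    have e2 : (pre.length : Int) + 1 + ((b :: t).length : Int)
        = ((pre ++ [a]).length : Int) + 1 + (t.length : Int) := by
      simp
      push_cast
      ring
    by_cases hb : ballp b = true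
    · by_cases h1 : (a == 'O') = true
      · rw [if_pos hb, if_pos h1]
        rw [show pre ++ (a :: '.' :: t) ++ [z] = (pre ++ [a]) ++ '.' :: t ++ [z] from by simp]
        rw [e1, e2, ih (pre ++ [a]) '.']
        rw [sw_cons2, if_pos hb, if_pos h1]
        simp
      · by_cases h2 : (a == '.') = true
        · rw [if_pos hb, if_neg h1, if_pos h2]
          rw [show pre ++ (b :: '.' :: t) ++ [z] = (pre ++ [b]) ++ '.' :: t ++ [z] from by simp]
          rw [show ((pre ++ [a]).length : Int) = ((pre ++ [b]).length : Int) from by simp] at e1 e2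
          rw [e1, e2, ih (pre ++ [b]) '.']
          rw [sw_cons2, if_pos hb, if_neg h1, if_pos h2]
          simp
        · rw [if_pos hb, if_neg h1, if_neg h2]
          rw [show pre ++ (a :: b :: t) ++ [z] = (pre ++ [a]) ++ b :: t ++ [z] from by simp]
          rw [e1, e2, ih (pre ++ [a]) b]
          rw [sw_cons2, if_pos hb, if_neg h1, if_neg h2]
          simp
    · rw [if_neg hb]
      rw [show pre ++ (a :: b :: t) ++ [z] = (pre ++ [a]) ++ b :: t ++ [z] from by simp]
      rw [e1, e2, ih (pre ++ [a]) b]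
      rw [sw_cons2, if_neg hb]
      simp

lemma innerFoldA_eq (x : Char) (c : List Char) (z : Char) :
    innerFoldA (x :: c ++ [z]) = x :: sw c ++ [z] := by
  unfold innerFoldA
  cases c with
  | nil =>
    rw [PySem.List.pyRange_one_eq_nil (by simp)]
    simp [sw_nil]
  | cons a t =>
    have hlen : ((x :: (a :: t) ++ [z]).length : Int) - 1
        = (([x].length : Int) + 1) + t.length := by
      simp
      push_cast
      ring
    rw [hlen]
    rw [show x :: (a :: t) ++ [z] = [x] ++ a :: t ++ [z] from by simp]
    rw [show (2 : Int) = ([x].length : Int) + 1 from by simp]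
    rw [stepFold t [x] a z]
    simp

lemma innerIter (k : Nat) (x : Char) (c : List Char) (z : Char) :
    innerFoldA^[k] (x :: c ++ [z]) = x :: sw^[k] c ++ [z] := by
  induction k generalizing c with
  | zero => simp
  | succ n ih =>
    rw [Function.iterate_succ_apply, Function.iterate_succ_apply (f := sw),
      innerFoldA_eq, ih (sw c)]

lemma core_eq (M : List Char) :
    (PySem.List.pyRange 0 ((M.length : Int) - 3) 1).foldl (fun l _k => innerFoldA l) M
      = (if M.length ≤ 1 then M
        else
          PySem.List.pyGetD M 0 ' ' ::
            (((PySem.List.slice M (some 1) (some ((M.length : Int) - 1))).foldl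
                (fun (ps : List Char × List Char) c =>
                  if c == '.' || c == 'O' || c == 'B' || c == 'R' then (ps.1, ps.2 ++ [c])
                  else (ps.1 ++ settleSegB ps.2 ++ [c], [])) ([], [])).1
              ++ settleSegB ((PySem.List.slice M (some 1) (some ((M.length : Int) - 1))).foldl
                (fun (ps : List Char × List Char) c =>
                  if c == '.' || c == 'O' || c == 'B' || c == 'R' then (ps.1, ps.2 ++ [c])
                  else (ps.1 ++ settleSegB ps.2 ++ [c], [])) ([], [])).2)
            ++ [PySem.List.pyGetD M ((M.length : Int) - 1) ' ']) := by
  by_cases hM : M.length ≤ 1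
  · rw [if_pos hM, PySem.List.pyRange_one_eq_nil (by omega)]
    simp
  · rw [if_neg hM]
    obtain ⟨x, c, z, rfl⟩ := list_decomp M (by omega)
    have hn : (x :: c ++ [z]).length = c.length + 2 := by simp
    rw [foldl_const_iterate]
    rw [PySem.List.length_pyRange_one]
    rw [show (((x :: c ++ [z]).length : Int) - 3 - 0).toNat = c.length - 1 from by
      rw [hn]; push_cast; omega]
    rw [innerIter, sw_main c _ (le_refl _)]
    rw [show (((x :: c ++ [z]).length : Int) - 1) = ((c.length + 1 : Nat) : Int) from by
      rw [hn]; push_cast; ring]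
    rw [show ((x :: c ++ [z]) : List Char) = x :: (c ++ [z]) from rfl]
    rw [show (1 : Int) = ((1 : Nat) : Int) from rfl, PySem.List.slice_natCast]
    rw [show (x :: (c ++ [z])).drop 1 = c ++ [z] from rfl]
    rw [show c.length + 1 - 1 = c.length from by omega, take_pre]
    rw [b_fold c [] []]
    rw [PySem.List.pyGetD_zero_cons]
    rw [PySem.List.pyGetD_natCast]
    rw [show (x :: (c ++ [z])) = (x :: c) ++ z :: [] from by simp,
      show c.length + 1 = (x :: c).length from by simp, getD_mid]
    simp

-- ===== VERDICT (by name: the statement is the Claim_ definition above) =====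
theorem slide_ball_spec : Claim_equal_slide_ball := by
  unfold Claim_equal_slide_ball Spec_slide_ball
  intro line direction _
  simp only [slide_ball, slide_ball_alt]
  rw [core_eq]
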